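-- pv_equiv track=rewrite | github.com/Gorialis/jishaku | jishaku/utils/sync_utils.py | humanize_relative_time
-- ===== SOURCE A (Python) =====
-- def humanize_relative_time(seconds: int):
--     """
--     Converts an amount of time in seconds to a human-friendly format.
--     :param seconds: The amount of seconds, relative to now.
--     :return: The humanized string
--     """
--     # in case we get a float
--     seconds = int(seconds)
--
--     if seconds == 0:
--         return 'now'  # negligible time distance
--
--     if seconds < 0:
--         seconds = abs(seconds)
--         past = True  # append 'ago' when creating string
--     else:
--         past = False
--
--     minutes, seconds = divmod(seconds, 60)
--     hours, minutes = divmod(minutes, 60)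
--     days, hours = divmod(hours, 24)
--     weeks, days = divmod(days, 7)
--
--     seconds = round(seconds, 2)  # human-friendly numbers thanks
--
--     units = (weeks, 'week'), (days, 'day'), (hours, 'hour'), (minutes, 'minute'), (seconds, 'second')
--
--     formatted_unit_list = []
--     for measurement, unit in units:
--         if not measurement:
--             continue
--         formatted_unit_list.append('{} {}'.format(measurement, unit + ('s' if measurement - 1 else '')))
--
--     return ', '.join(formatted_unit_list) + (' ago' if past else '')
-- ===== SOURCE B (Python) =====
-- def humanize_relative_time(seconds: int):
--     """Same result as A: each unit is computed independently by closed-form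
--     modular arithmetic (no cascaded divmod), and the output string is built
--     back-to-front by a recursive emitter with explicit separator handling
--     (no intermediate list, no join)."""
--     s = int(seconds)
--     if s == 0:
--         return 'now'
--     n = abs(s)
--
--     def emit(value, name, rest):
--         if value == 0:
--             return rest
--         piece = '{} {}'.format(value, name if value == 1 else name + 's')
--         return piece if not rest else piece + ', ' + rest
--
--     body = emit(n // 604800, 'week',
--            emit(n // 86400 % 7, 'day',
--            emit(n // 3600 % 24, 'hour',
--            emit(n // 60 % 60, 'minute',
--            emit(n % 60, 'second', '')))))
--     return body + ' ago' if s < 0 else body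
-- ===== Notes on version B (the rewrite author's own statement) =====
-- stated objective: alternative
-- what changed: A cascades four divmods and then loops to collect pieces into a list it joins; B computes each unit independently by closed-form modular arithmetic on the total (n//604800, n//86400%7, ...) and builds the string back-to-front with a recursive emitter that handles the separator itself, with no loop, no list and no join.
import Mathlib
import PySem

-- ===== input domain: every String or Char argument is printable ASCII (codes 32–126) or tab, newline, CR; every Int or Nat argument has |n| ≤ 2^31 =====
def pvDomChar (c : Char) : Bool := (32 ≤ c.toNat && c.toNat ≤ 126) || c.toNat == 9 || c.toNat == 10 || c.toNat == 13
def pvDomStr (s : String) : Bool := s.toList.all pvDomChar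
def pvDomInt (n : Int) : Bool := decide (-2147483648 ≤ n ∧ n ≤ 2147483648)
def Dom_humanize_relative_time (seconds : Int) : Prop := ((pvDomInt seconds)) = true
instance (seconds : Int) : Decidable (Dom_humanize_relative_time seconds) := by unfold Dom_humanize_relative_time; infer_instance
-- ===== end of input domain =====

-- B computes every unit independently by closed-form modular arithmetic (no cascaded
-- divmod) and builds the result back-to-front with a recursive emitter carrying explicit
-- separator logic (no list, no loop, no join); objective: alternative, same cost.

-- ===== PORT A =====
def humanize_relative_time (seconds : Int) : String :=
  if seconds = 0 then "now"
  else
    let past : Bool := seconds < 0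
    let s1 : Int := if seconds < 0 then -seconds else seconds  -- abs(seconds)
    let minutes := PySem.Int.floordiv s1 60
    let secs := PySem.Int.mod s1 60
    let hours := PySem.Int.floordiv minutes 60
    let mins := PySem.Int.mod minutes 60
    let days := PySem.Int.floordiv hours 24
    let hrs := PySem.Int.mod hours 24
    let weeks := PySem.Int.floordiv days 7
    let dys := PySem.Int.mod days 7
    -- round(seconds, 2) on an int returns the int unchanged
    let units : List (Int × String) :=
      [(weeks, "week"), (dys, "day"), (hrs, "hour"), (mins, "minute"), (secs, "second")]
    let formatted := units.foldl (fun acc mu =>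
      if mu.1 = 0 then acc
      else acc ++ [PySem.Int.toStr mu.1 ++ " " ++ (mu.2 ++ (if mu.1 - 1 ≠ 0 then "s" else ""))]) []
    PySem.Str.join ", " formatted ++ (if past then " ago" else "")

-- ===== PORT B =====
-- helper: Python's nested 'emit(value, name, rest)'
def pvEmit (value : Int) (name rest : String) : String :=
  if value = 0 then rest
  else
    let piece := PySem.Int.toStr value ++ " " ++ (if value = 1 then name else name ++ "s")
    if rest = "" then piece else piece ++ ", " ++ rest

def humanize_relative_time_alt (seconds : Int) : String :=
  if seconds = 0 then "now"
  else
    let n := |seconds|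
    let body :=
      pvEmit (PySem.Int.floordiv n 604800) "week"
        (pvEmit (PySem.Int.mod (PySem.Int.floordiv n 86400) 7) "day"
          (pvEmit (PySem.Int.mod (PySem.Int.floordiv n 3600) 24) "hour"
            (pvEmit (PySem.Int.mod (PySem.Int.floordiv n 60) 60) "minute"
              (pvEmit (PySem.Int.mod n 60) "second" ""))))
    if seconds < 0 then body ++ " ago" else body

-- ===== PRECONDITION & SPEC =====
def Spec_humanize_relative_time (seconds : Int) (out : String) : Prop := out = humanize_relative_time_alt seconds
instance (seconds : Int) (out : String) : Decidable (Spec_humanize_relative_time seconds out) := by unfold Spec_humanize_relative_time; infer_instance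

-- ===== CLAIM (what is proved, stated in full; the proofs are below) =====
def Claim_equal_humanize_relative_time : Prop := ∀ (seconds : Int), Dom_humanize_relative_time seconds → Spec_humanize_relative_time seconds (humanize_relative_time seconds)

-- ===== LEMMAS AND PROOFS =====

-- string-level bridges for PySem.Chars.join_singleton / join_cons_cons
theorem str_join_singleton (p : String) : PySem.Str.join ", " [p] = p := by
  apply String.toList_inj.mp
  simp [PySem.Str.toList_join, PySem.Chars.join_singleton]

theorem str_join_cons_cons (a b : String) (t : List String) :
    PySem.Str.join ", " (a::b::t) = a ++ ", " ++ PySem.Str.join ", " (b::t) := by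
  apply String.toList_inj.mp
  simp [PySem.Str.toList_join, PySem.Chars.join_cons_cons, String.toList_append]

-- A's formatted piece is never the empty string (it contains the literal ' ')
theorem pv_ne1 (v : Int) (x : String) : (PySem.Int.toStr v ++ " " ++ x) ≠ "" := by
  intro h
  have h2 := String.toList_inj.mpr h
  simp [String.toList_append] at h2

-- join of a nonempty list of nonempty pieces is nonempty; join "" of [] is ""
theorem pv_join_ne (l : List String) (hl : ∀ x ∈ l, x ≠ "") (hne : l ≠ []) :
    PySem.Str.join ", " l ≠ "" := by
  cases l with
  | nil => exact absurd rfl hne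
  | cons a t =>
    cases t with
    | nil =>
      rw [str_join_singleton]
      exact hl a (by simp)
    | cons b t' =>
      rw [str_join_cons_cons]
      intro h
      have h2 := String.toList_inj.mpr h
      simp [String.toList_append] at h2

-- A's pluralized piece equals B's pluralized piece
theorem pv_piece (v : Int) (nm : String) :
    PySem.Int.toStr v ++ " " ++ (nm ++ (if v - 1 ≠ 0 then "s" else "")) =
    PySem.Int.toStr v ++ " " ++ (if v = 1 then nm else nm ++ "s") := by
  by_cases h1 : v = 1
  · simp [h1]
  · rw [if_pos (by omega), if_neg h1]

-- one unit level: appending an optional piece in front of the list is pvEmit on the join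
theorem pv_level (v : Int) (nm : String) (l : List String) (hl : ∀ x ∈ l, x ≠ "") :
    PySem.Str.join ", "
      ((if v = 0 then [] else [PySem.Int.toStr v ++ " " ++ (nm ++ (if v - 1 ≠ 0 then "s" else ""))]) ++ l)
    = pvEmit v nm (PySem.Str.join ", " l) := by
  by_cases hv : v = 0
  · simp [hv, pvEmit]
  · rw [if_neg hv]
    cases l with
    | nil =>
      simp only [List.append_nil]
      rw [str_join_singleton, pv_piece]
      simp [pvEmit, hv, PySem.Str.join]
    | cons a t =>
      have hjoin : PySem.Str.join ", " (a :: t) ≠ "" := pv_join_ne _ hl (by simp)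
      rw [List.cons_append, List.nil_append, str_join_cons_cons, pv_piece]
      simp only [pvEmit, if_neg hv, if_neg hjoin]

-- accumulator step of A's loop, rewritten as an optional-singleton append
theorem pv_acc (c : Prop) [Decidable c] (acc : List String) (p : String) :
    (if c then acc else acc ++ [p]) = acc ++ (if c then [] else [p]) := by
  split <;> simp

theorem pv_opt_ne (v : Int) (nm x : String)
    (hx : x ∈ (if v = 0 then ([] : List String) else [PySem.Int.toStr v ++ " " ++ (nm ++ (if v - 1 ≠ 0 then "s" else ""))])) :
    x ≠ "" := by
  split at hx
  · simp at hx
  · simp at hx; subst hx; exact pv_ne1 _ _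

-- ===== VERDICT (by name: the statement is the Claim_ definition above) =====
theorem humanize_relative_time_spec : Claim_equal_humanize_relative_time := by
  intro s _
  unfold Spec_humanize_relative_time humanize_relative_time humanize_relative_time_alt
  by_cases h0 : s = 0
  · simp [h0]
  · have habs : (if s < 0 then -s else s) = |s| := by
      by_cases h : s < 0
      · rw [if_pos h, abs_of_neg h]
      · rw [if_neg h, abs_of_nonneg (le_of_not_gt h)]
    simp only [h0, if_false, habs]
    set n := |s| with hn'
    -- reduce all unit values to the same closed forms
    simp only [PySem.Int.floordiv_eq_ediv_of_pos (by norm_num : (0:Int) < 60),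
      PySem.Int.floordiv_eq_ediv_of_pos (by norm_num : (0:Int) < 24),
      PySem.Int.floordiv_eq_ediv_of_pos (by norm_num : (0:Int) < 7),
      PySem.Int.floordiv_eq_ediv_of_pos (by norm_num : (0:Int) < 604800),
      PySem.Int.floordiv_eq_ediv_of_pos (by norm_num : (0:Int) < 86400),
      PySem.Int.floordiv_eq_ediv_of_pos (by norm_num : (0:Int) < 3600),
      PySem.Int.mod_eq_emod_of_pos (by norm_num : (0:Int) < 60),
      PySem.Int.mod_eq_emod_of_pos (by norm_num : (0:Int) < 24),
      PySem.Int.mod_eq_emod_of_pos (by norm_num : (0:Int) < 7)]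
    have hw : n/60/60/24/7 = n/604800 := by omega
    have hd : n/60/60/24%7 = n/86400%7 := by omega
    have hh : n/60/60%24 = n/3600%24 := by omega
    simp only [hw, hd, hh]
    -- unfold A's loop over the literal unit list and regroup as optional singletons
    simp only [List.foldl]
    simp only [pv_acc]
    simp only [List.nil_append, List.append_assoc]
    -- peel the five unit levels
    rw [show ((if n%60 = 0 then ([]:List String) else [PySem.Int.toStr (n%60) ++ " " ++ ("second" ++ (if n%60 - 1 ≠ 0 then "s" else ""))]) : List String) =
        (if n%60 = 0 then ([]:List String) else [PySem.Int.toStr (n%60) ++ " " ++ ("second" ++ (if n%60 - 1 ≠ 0 then "s" else ""))]) ++ [] from (List.append_nil _).symm]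
    rw [pv_level _ "week" _ ?hl1, pv_level _ "day" _ ?hl2, pv_level _ "hour" _ ?hl3,
        pv_level _ "minute" _ ?hl4, pv_level _ "second" _ ?hl5]
    case hl1 => intro x hx; simp only [List.mem_append] at hx
                rcases hx with hx|hx|hx|hx|hx
                · exact pv_opt_ne _ _ _ hx
                · exact pv_opt_ne _ _ _ hx
                · exact pv_opt_ne _ _ _ hx
                · exact pv_opt_ne _ _ _ hx
                · simp at hx
    case hl2 => intro x hx; simp only [List.mem_append] at hx
                rcases hx with hx|hx|hx|hx
                · exact pv_opt_ne _ _ _ hx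
                · exact pv_opt_ne _ _ _ hx
                · exact pv_opt_ne _ _ _ hx
                · simp at hx
    case hl3 => intro x hx; simp only [List.mem_append] at hx
                rcases hx with hx|hx|hx
                · exact pv_opt_ne _ _ _ hx
                · exact pv_opt_ne _ _ _ hx
                · simp at hx
    case hl4 => intro x hx; simp only [List.mem_append] at hx
                rcases hx with hx|hx
                · exact pv_opt_ne _ _ _ hx
                · simp at hx
    case hl5 => intro x hx; simp at hx
    -- empty join at the bottom, and the past-tense suffix
    by_cases hneg : s < 0 <;> simp [hneg, PySem.Str.join]
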